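-- pv_equiv track=rewrite | github.com/Rashicom/Data-Structure | overlap.py | find_overlapping_pairs
-- ===== SOURCE A (Python) =====
-- def find_overlapping_pairs(intervals):
--     lenn = len(intervals)-1
--     result = []
--     temp_list = []
--     for interval in intervals:
--         if len(temp_list) == 0:
--             temp_list.append(interval)
--         elif temp_list[-1][1] > interval[0]:
--             temp_list.append(interval)
--         else:
--             result.append(temp_list)
--             temp_list = [interval]
--
--     result.append(temp_list)
--     return result
-- ===== SOURCE B (Python) =====
-- def find_overlapping_pairs(intervals):
--     result = []
--     start = 0
--     for i in range(1, len(intervals)):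
--         if intervals[i - 1][1] <= intervals[i][0]:
--             result.append(intervals[start:i])
--             start = i
--     result.append(intervals[start:])
--     return result
-- ===== Notes on version B (the rewrite author's own statement) =====
-- stated objective: simpler
-- what changed: B finds cluster boundaries by comparing adjacent intervals by index and emits each cluster as a slice of the input, instead of maintaining, growing and flushing a temporary list of intervals as A does.
import Mathlib
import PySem

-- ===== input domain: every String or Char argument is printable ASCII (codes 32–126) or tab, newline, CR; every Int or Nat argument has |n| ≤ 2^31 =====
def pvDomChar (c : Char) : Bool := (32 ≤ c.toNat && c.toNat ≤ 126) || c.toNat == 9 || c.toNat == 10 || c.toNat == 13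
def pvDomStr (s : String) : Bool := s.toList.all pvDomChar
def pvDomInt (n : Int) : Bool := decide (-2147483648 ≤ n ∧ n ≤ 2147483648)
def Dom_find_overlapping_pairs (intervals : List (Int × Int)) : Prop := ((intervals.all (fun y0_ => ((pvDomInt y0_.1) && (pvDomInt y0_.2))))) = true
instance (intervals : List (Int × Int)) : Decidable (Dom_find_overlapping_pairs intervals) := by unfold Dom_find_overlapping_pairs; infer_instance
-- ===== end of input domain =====

-- B replaces A's grow-and-flush temporary list with boundary detection on adjacent
-- intervals plus slicing of the input; objective: simpler, same O(n) cost.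


-- ===== PORT A =====
-- loop body of A: state = (result, temp_list)
def pvStepA (s : List (List (Int × Int)) × List (Int × Int)) (interval : Int × Int) :
    List (List (Int × Int)) × List (Int × Int) :=
  if s.2.length = 0 then (s.1, s.2 ++ [interval])
  else if ((PySem.List.pyGet? s.2 (-1)).getD interval).2 > interval.1 then
    (s.1, s.2 ++ [interval])
  else (s.1 ++ [s.2], [interval])

def find_overlapping_pairs (intervals : List (Int × Int)) : List (List (Int × Int)) :=
  let s := intervals.foldl pvStepA ([], [])
  s.1 ++ [s.2]

-- ===== PORT B =====
-- loop body of B: state = (result, start)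
def pvStepB (intervals : List (Int × Int)) (s : List (List (Int × Int)) × Int) (i : Int) :
    List (List (Int × Int)) × Int :=
  if ((PySem.List.pyGet? intervals (i - 1)).getD (0, 0)).2
      ≤ ((PySem.List.pyGet? intervals i).getD (0, 0)).1 then
    (s.1 ++ [PySem.List.slice intervals (some s.2) (some i)], i)
  else s

def find_overlapping_pairs_alt (intervals : List (Int × Int)) : List (List (Int × Int)) :=
  let s := (PySem.List.pyRange 1 (intervals.length : Int) 1).foldl (pvStepB intervals) ([], 0)
  s.1 ++ [PySem.List.slice intervals (some s.2) none]

-- ===== PRECONDITION & SPEC =====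
def Spec_find_overlapping_pairs (intervals : List (Int × Int)) (out : List (List (Int × Int))) : Prop := out = find_overlapping_pairs_alt intervals
instance (intervals : List (Int × Int)) (out : List (List (Int × Int))) : Decidable (Spec_find_overlapping_pairs intervals out) := by unfold Spec_find_overlapping_pairs; infer_instance

-- ===== CLAIM (what is proved, stated in full; the proofs are below) =====
def Claim_equal_find_overlapping_pairs : Prop := ∀ (intervals : List (Int × Int)), Dom_find_overlapping_pairs intervals → Spec_find_overlapping_pairs intervals (find_overlapping_pairs intervals)

-- ===== LEMMAS AND PROOFS =====

-- invariant relating A's state after k elements to B's state after indices 1..k-1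
theorem pv_invariant (intervals : List (Int × Int)) :
    ∀ k : ℕ, 1 ≤ k → k ≤ intervals.length →
      ∃ st : ℕ,
        ((PySem.List.pyRange 1 (k : Int) 1).foldl (pvStepB intervals) ([], 0)).2 = (st : Int) ∧
        st < k ∧
        ((intervals.take k).foldl pvStepA ([], [])).1
          = ((PySem.List.pyRange 1 (k : Int) 1).foldl (pvStepB intervals) ([], 0)).1 ∧
        ((intervals.take k).foldl pvStepA ([], [])).2
          = (intervals.drop st).take (k - st) := by
  intro k
  induction k with
  | zero => omega
  | succ k ih =>
    intro _ hk1
    by_cases hk0 : k = 0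
    · subst hk0
      refine ⟨0, ?_, ?_, ?_, ?_⟩
      · simp [PySem.List.pyRange_one_eq_nil]
      · omega
      · simp [PySem.List.pyRange_one_eq_nil, List.take_add_one,
          List.getElem?_eq_getElem (show 0 < intervals.length by omega), pvStepA]
      · simp [List.take_add_one,
          List.getElem?_eq_getElem (show 0 < intervals.length by omega), pvStepA]
    · have hk : 1 ≤ k := by omega
      have hklen : k < intervals.length := by omega
      obtain ⟨st, hb2, hstk, hres, htemp⟩ := ih hk (by omega)
      -- unfold one step on each side
      have htake : intervals.take (k + 1)
          = intervals.take k ++ [intervals[k]] := by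
        rw [List.take_add_one, List.getElem?_eq_getElem hklen]; rfl
      have hrange : PySem.List.pyRange 1 ((k + 1 : ℕ) : Int) 1
          = PySem.List.pyRange 1 (k : Int) 1 ++ [(k : Int)] := by
        push_cast
        exact PySem.List.pyRange_one_succ_right (by exact_mod_cast hk)
      -- facts about A's temp list
      have hlentemp : ((intervals.take k).foldl pvStepA ([], [])).2.length = k - st := by
        rw [htemp]; simp; omega
      have hlast : ((intervals.take k).foldl pvStepA ([], [])).2.getLast?
          = some (intervals[k - 1]'(by omega)) := by
        rw [htemp, List.getLast?_eq_getElem?]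
        have h1 : ((intervals.drop st).take (k - st)).length = k - st := by simp; omega
        rw [h1, List.getElem?_take_of_lt (by omega), List.getElem?_drop,
          show st + (k - st - 1) = k - 1 by omega,
          List.getElem?_eq_getElem (by omega)]
      -- B's two lookups
      have hbm1 : PySem.List.pyGet? intervals ((k : Int) - 1)
          = some (intervals[k - 1]'(by omega)) := by
        rw [show ((k : Int) - 1) = ((k - 1 : ℕ) : Int) by omega,
          PySem.List.pyGet?_natCast, List.getElem?_eq_getElem (by omega)]
      have hbk : PySem.List.pyGet? intervals ((k : Int))
          = some (intervals[k]'hklen) := by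
        rw [PySem.List.pyGet?_natCast, List.getElem?_eq_getElem hklen]
      rw [htake, hrange, List.foldl_append, List.foldl_append]
      simp only [List.foldl_cons, List.foldl_nil]
      by_cases hov : (intervals[k]'hklen).1 < (intervals[k - 1]'(by omega)).2
      · -- overlap: A appends to temp, B does nothing
        have hA : pvStepA ((intervals.take k).foldl pvStepA ([], [])) (intervals[k]'hklen)
            = (((intervals.take k).foldl pvStepA ([], [])).1,
               ((intervals.take k).foldl pvStepA ([], [])).2 ++ [intervals[k]'hklen]) := by
          simp only [pvStepA, PySem.List.pyGet?_neg_one, hlast, hlentemp, Option.getD_some]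
          rw [if_neg (show ¬(k - st = 0) by omega), if_pos hov]
        have hB : pvStepB intervals
              ((PySem.List.pyRange 1 (k : Int) 1).foldl (pvStepB intervals) ([], 0)) (k : Int)
            = (PySem.List.pyRange 1 (k : Int) 1).foldl (pvStepB intervals) ([], 0) := by
          simp only [pvStepB, hbm1, hbk, Option.getD_some]
          rw [if_neg (show ¬((intervals[k - 1]'(by omega)).2 ≤ (intervals[k]'hklen).1) by omega)]
        rw [hA, hB]
        refine ⟨st, hb2, by omega, hres, ?_⟩
        simp only
        rw [htemp, show k + 1 - st = (k - st) + 1 by omega, List.take_add_one,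
          List.getElem?_drop, show st + (k - st) = k by omega,
          List.getElem?_eq_getElem hklen]
        rfl
      · -- boundary: A flushes temp, B records the slice
        have hA : pvStepA ((intervals.take k).foldl pvStepA ([], [])) (intervals[k]'hklen)
            = (((intervals.take k).foldl pvStepA ([], [])).1
                ++ [((intervals.take k).foldl pvStepA ([], [])).2], [intervals[k]'hklen]) := by
          simp only [pvStepA, PySem.List.pyGet?_neg_one, hlast, hlentemp, Option.getD_some]
          rw [if_neg (show ¬(k - st = 0) by omega), if_neg hov]
        have hB : pvStepB intervals
              ((PySem.List.pyRange 1 (k : Int) 1).foldl (pvStepB intervals) ([], 0)) (k : Int)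
            = (((PySem.List.pyRange 1 (k : Int) 1).foldl (pvStepB intervals) ([], 0)).1
                ++ [PySem.List.slice intervals
                    (some ((PySem.List.pyRange 1 (k : Int) 1).foldl (pvStepB intervals) ([], 0)).2)
                    (some (k : Int))], (k : Int)) := by
          simp only [pvStepB, hbm1, hbk, Option.getD_some]
          rw [if_pos (show (intervals[k - 1]'(by omega)).2 ≤ (intervals[k]'hklen).1 by omega)]
        rw [hA, hB]
        refine ⟨k, rfl, by omega, ?_, ?_⟩
        · simp only
          rw [hres, htemp, hb2, PySem.List.slice_natCast]
        · simp only
          rw [show k + 1 - k = 1 by omega, show (1 : ℕ) = 0 + 1 from rfl, List.take_add_one,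
            List.take_zero, List.getElem?_drop, Nat.add_zero, List.getElem?_eq_getElem hklen]
          rfl

theorem find_overlapping_pairs_spec : Claim_equal_find_overlapping_pairs := by
  intro intervals _
  unfold Spec_find_overlapping_pairs
  by_cases hnil : intervals = []
  · subst hnil; decide
  · have hlen : 1 ≤ intervals.length := by
      cases intervals with
      | nil => simp at hnil
      | cons a t => simp
    obtain ⟨st, hb2, hstk, hres, htemp⟩ :=
      pv_invariant intervals intervals.length hlen le_rfl
    rw [List.take_length] at hres htemp
    simp only [find_overlapping_pairs, find_overlapping_pairs_alt]
    rw [hres, htemp, hb2, PySem.List.slice_from_natCast,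
      List.take_of_length_le (by simp)]
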